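-- pv_equiv track=rewrite | github.com/janosgyerik/advent-of-code | 2020/day16/part1.py | find_completely_invalid
-- ===== SOURCE A (Python) =====
-- def build_intervals(fields):
--     intervals = []
--     for pairs in fields.values():
--         intervals.extend(pairs)
--
--     return intervals
--
-- def within_any_interval(intervals, v):
--     for start, end in intervals:
--         if start <= v <= end:
--             return True
--
--     return False
--
-- def find_completely_invalid(fields, others):
--     intervals = build_intervals(fields)
--     invalid = []
--     for other in others:
--         for v in other:
--             if not within_any_interval(intervals, v):
--                 invalid.append(v)
--
--     return invalid
-- ===== SOURCE B (Python) =====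
-- from bisect import bisect_right
--
--
-- def find_completely_invalid(fields, others):
--     # Sort the (non-empty) intervals by start, merge overlapping ones once,
--     # then locate each value by binary search over the merged starts.
--     intervals = sorted((p for pairs in fields.values() for p in pairs if p[0] <= p[1]),
--                        key=lambda p: p[0])
--     merged = []
--     cur = None
--     for s, e in intervals:
--         if cur is None:
--             cur = (s, e)
--         elif s <= cur[1]:
--             cur = (cur[0], max(cur[1], e))
--         else:
--             merged.append(cur)
--             cur = (s, e)
--     if cur is not None:
--         merged.append(cur)
--     starts = [s for s, _ in merged]
--     ends = [e for _, e in merged]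
--     invalid = []
--     for other in others:
--         for v in other:
--             i = bisect_right(starts, v)
--             if i == 0 or v > ends[i - 1]:
--                 invalid.append(v)
--     return invalid
-- ===== Notes on version B (the rewrite author's own statement) =====
-- stated objective: faster
-- what changed: Instead of scanning every interval for every ticket value, B sorts the intervals by start once, merges them into disjoint intervals, and decides each value by a single bisect_right binary search.
import Mathlib
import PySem

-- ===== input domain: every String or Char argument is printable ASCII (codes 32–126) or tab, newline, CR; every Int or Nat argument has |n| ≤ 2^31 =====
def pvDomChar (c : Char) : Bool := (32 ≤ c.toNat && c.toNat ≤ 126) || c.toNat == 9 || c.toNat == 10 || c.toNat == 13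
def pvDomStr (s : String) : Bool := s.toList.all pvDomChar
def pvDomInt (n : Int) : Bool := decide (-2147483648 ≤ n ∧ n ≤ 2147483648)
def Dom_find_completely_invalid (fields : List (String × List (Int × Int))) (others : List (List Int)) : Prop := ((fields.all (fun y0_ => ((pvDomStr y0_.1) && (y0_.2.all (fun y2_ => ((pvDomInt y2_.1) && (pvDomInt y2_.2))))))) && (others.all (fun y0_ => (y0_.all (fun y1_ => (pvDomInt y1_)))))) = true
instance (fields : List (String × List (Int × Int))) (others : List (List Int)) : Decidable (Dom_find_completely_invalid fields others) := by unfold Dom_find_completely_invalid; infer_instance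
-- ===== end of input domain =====

-- B replaces A's per-value linear scan over all intervals by sort-merge preprocessing
-- plus one binary search per value (objective: faster; the timed check measures it).


-- ===== PORT A =====
def build_intervals (fields : List (String × List (Int × Int))) : List (Int × Int) :=
  (fields.map Prod.snd).foldl (fun intervals pairs => intervals ++ pairs) []

def within_any_interval (intervals : List (Int × Int)) (v : Int) : Bool :=
  match intervals with
  | [] => false
  | (s, e) :: rest => if s ≤ v ∧ v ≤ e then true else within_any_interval rest v

def find_completely_invalid (fields : List (String × List (Int × Int))) (others : List (List Int)) : List Int :=
  let intervals := build_intervals fields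
  others.foldl (fun invalid other =>
    other.foldl (fun invalid v =>
      if !within_any_interval intervals v then invalid ++ [v] else invalid) invalid) []

-- ===== PORT B =====
-- one step of Source B's merge loop over the state (merged, cur)
def fciMergeStep (st : List (Int × Int) × Option (Int × Int)) (p : Int × Int) :
    List (Int × Int) × Option (Int × Int) :=
  match st.2 with
  | none => (st.1, some p)
  | some c => if p.1 ≤ c.2 then (st.1, some (c.1, max c.2 p.2)) else (st.1 ++ [c], some p)

-- the final 'if cur is not None: merged.append(cur)'
def fciFlush (st : List (Int × Int) × Option (Int × Int)) : List (Int × Int) :=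
  match st.2 with
  | none => st.1
  | some c => st.1 ++ [c]

def find_completely_invalid_alt (fields : List (String × List (Int × Int))) (others : List (List Int)) : List Int :=
  let intervals := PySem.List.sorted (((fields.map Prod.snd).flatten).filter (fun p => decide (p.1 ≤ p.2))) (fun p => p.1)
  let merged := fciFlush (intervals.foldl fciMergeStep ([], none))
  let starts := merged.map Prod.fst
  let ends := merged.map Prod.snd
  others.foldl (fun invalid other =>
    other.foldl (fun invalid v =>
      let i := PySem.List.bisectRight starts v
      -- ends[i-1]: with i ≠ 0 the index i-1 is always in range, so getD is exact here
      if i = 0 ∨ ends.getD (i - 1) 0 < v then invalid ++ [v] else invalid) invalid) []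

-- ===== PRECONDITION & SPEC =====
def Spec_find_completely_invalid (fields : List (String × List (Int × Int))) (others : List (List Int)) (out : List Int) : Prop := out = find_completely_invalid_alt fields others
instance (fields : List (String × List (Int × Int))) (others : List (List Int)) (out : List Int) : Decidable (Spec_find_completely_invalid fields others out) := by unfold Spec_find_completely_invalid; infer_instance

-- ===== CLAIM (what is proved, stated in full; the proofs are below) =====
def Claim_equal_find_completely_invalid : Prop := ∀ (fields : List (String × List (Int × Int))) (others : List (List Int)), Dom_find_completely_invalid fields others → Spec_find_completely_invalid fields others (find_completely_invalid fields others)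

-- ===== LEMMAS AND PROOFS =====

-- 'v lies in interval p'
def covf (v : Int) (p : Int × Int) : Bool := decide (p.1 ≤ v) && decide (v ≤ p.2)

-- 'v lies in some interval of m'
def cov (m : List (Int × Int)) (v : Int) : Bool := m.any (covf v)

lemma within_eq_cov (xs : List (Int × Int)) (v : Int) :
    within_any_interval xs v = cov xs v := by
  induction xs with
  | nil => rfl
  | cons p rest ih =>
    obtain ⟨s, e⟩ := p
    by_cases h : s ≤ v ∧ v ≤ e <;>
      simp [within_any_interval, cov, covf, ih, h]

lemma covf_false_of_empty (p : Int × Int) (h : ¬ p.1 ≤ p.2) (v : Int) : covf v p = false := by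
  simp [covf]; omega

lemma cov_filter (xs : List (Int × Int)) (v : Int) :
    cov (xs.filter (fun p => decide (p.1 ≤ p.2))) v = cov xs v := by
  induction xs with
  | nil => rfl
  | cons p rest ih =>
    by_cases h : p.1 ≤ p.2
    · simp only [List.filter_cons, h, decide_true, if_pos, cov, List.any_cons] at ih ⊢
      rw [ih]
    · simp only [List.filter_cons, h, decide_false, if_neg, Bool.false_eq_true,
        not_false_eq_true, cov, List.any_cons] at ih ⊢
      rw [ih, covf_false_of_empty p h v, Bool.false_or]

-- coverage is preserved by the merge loop
lemma merge_cov (v : Int) :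
    ∀ (xs acc : List (Int × Int)) (c : Option (Int × Int)),
    xs.Pairwise (fun a b => a.1 ≤ b.1) →
    (∀ cc ∈ c, ∀ p ∈ xs, cc.1 ≤ p.1) →
    cov (fciFlush (xs.foldl fciMergeStep (acc, c))) v
      = (cov (fciFlush (acc, c)) v || cov xs v) := by
  intro xs
  induction xs with
  | nil => intro acc c _ _; simp [cov]
  | cons p rest ih =>
    intro acc c hsort hc
    have hsort' := (List.pairwise_cons.mp hsort).2
    have hhead := (List.pairwise_cons.mp hsort).1
    cases c with
    | none =>
      simp only [List.foldl_cons, fciMergeStep]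
      rw [ih acc (some p) hsort' (by intro cc hcc q hq; simp at hcc; subst hcc; exact hhead q hq)]
      simp only [fciFlush, cov, List.any_cons]
      simp [Bool.or_assoc]
    | some cc =>
      have hccp : cc.1 ≤ p.1 := hc cc (by simp) p (by simp)
      simp only [List.foldl_cons, fciMergeStep]
      by_cases hle : p.1 ≤ cc.2
      · rw [if_pos hle]
        rw [ih acc (some (cc.1, max cc.2 p.2)) hsort'
            (by intro c' hc'; simp at hc'; subst hc'; intro q hq; exact hc cc (by simp) q (by simp [hq]))]
        have key : covf v (cc.1, max cc.2 p.2) = (covf v cc || covf v p) := by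
          simp only [covf]
          by_cases h1 : cc.1 ≤ v <;> by_cases h2 : v ≤ cc.2 <;>
            by_cases h3 : p.1 ≤ v <;> by_cases h4 : v ≤ p.2 <;>
            simp [h1, h2, h3, h4] <;> omega
        simp only [fciFlush, cov, List.any_cons, List.any_append, List.any_nil] at key ⊢
        rw [key]
        simp [Bool.or_assoc]
      · rw [if_neg hle]
        rw [ih (acc ++ [cc]) (some p) hsort' (by intro c' hc'; simp at hc'; subst hc'; exact hhead)]
        simp only [fciFlush, cov, List.any_cons, List.any_append, List.any_nil]
        simp [Bool.or_assoc]

-- structural invariant of the merge loop: nonempty, pairwise-disjoint, start-sorted output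
def MOk (m : List (Int × Int)) : Prop :=
  (∀ p ∈ m, p.1 ≤ p.2) ∧ m.Pairwise (fun a b => a.2 < b.1)

lemma merge_ok :
    ∀ (xs acc : List (Int × Int)) (c : Option (Int × Int)),
    xs.Pairwise (fun a b => a.1 ≤ b.1) →
    (∀ p ∈ xs, p.1 ≤ p.2) →
    (∀ cc ∈ c, ∀ p ∈ xs, cc.1 ≤ p.1) →
    MOk acc →
    (∀ cc ∈ c, cc.1 ≤ cc.2 ∧ ∀ a ∈ acc, a.2 < cc.1) →
    (c = none → acc = []) →
    MOk (fciFlush (xs.foldl fciMergeStep (acc, c))) := by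
  intro xs
  induction xs with
  | nil =>
    intro acc c _ _ _ hacc hcur _
    cases c with
    | none => simpa [fciFlush] using hacc
    | some cc =>
      obtain ⟨hne, hlt⟩ := hcur cc (by simp)
      simp only [List.foldl_nil, fciFlush]
      constructor
      · intro p hp
        simp at hp
        rcases hp with hp | hp
        · exact hacc.1 p hp
        · subst hp; exact hne
      · rw [List.pairwise_append]
        exact ⟨hacc.2, by simp, by intro a ha b hb; simp at hb; subst hb; exact hlt a ha⟩
  | cons p rest ih =>
    intro acc c hsort hne hc hacc hcur hnone
    have hsort' := (List.pairwise_cons.mp hsort).2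
    have hhead := (List.pairwise_cons.mp hsort).1
    have hpne : p.1 ≤ p.2 := hne p (by simp)
    cases c with
    | none =>
      simp only [List.foldl_cons, fciMergeStep]
      exact ih acc (some p) hsort' (by intro q hq; exact hne q (by simp [hq]))
        (by intro cc hcc q hq; simp at hcc; subst hcc; exact hhead q hq)
        hacc
        (by intro cc hcc; simp at hcc; subst hcc
            exact ⟨hpne, by intro a ha; rw [hnone rfl] at ha; simp at ha⟩)
        (by simp)
    | some cc =>
      obtain ⟨hccne, hcclt⟩ := hcur cc (by simp)
      have hccp : cc.1 ≤ p.1 := hc cc (by simp) p (by simp)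
      simp only [List.foldl_cons, fciMergeStep]
      by_cases hle : p.1 ≤ cc.2
      · rw [if_pos hle]
        exact ih acc (some (cc.1, max cc.2 p.2)) hsort'
          (by intro q hq; exact hne q (by simp [hq]))
          (by intro c' hc'; simp at hc'; subst hc'; intro q hq; exact hc cc (by simp) q (by simp [hq]))
          hacc
          (by intro c' hc'; simp at hc'; subst hc'
              exact ⟨by simp; omega, by intro a ha; simpa using hcclt a ha⟩)
          (by simp)
      · rw [if_neg hle]
        refine ih (acc ++ [cc]) (some p) hsort'
          (by intro q hq; exact hne q (by simp [hq]))
          (by intro c' hc'; simp at hc'; subst hc'; exact hhead)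
          ?_ ?_ (by simp)
        · constructor
          · intro q hq; simp at hq
            rcases hq with hq | hq
            · exact hacc.1 q hq
            · subst hq; exact hccne
          · rw [List.pairwise_append]
            exact ⟨hacc.2, by simp, by intro a ha b hb; simp at hb; subst hb; exact hcclt a ha⟩
        · intro c' hc'; simp at hc'; subst hc'
          refine ⟨hpne, ?_⟩
          intro a ha; simp at ha
          rcases ha with ha | ha
          · have := hcclt a ha; omega
          · subst ha; omega

lemma cov_iff_getElem (m : List (Int × Int)) (v : Int) :
    cov m v = true ↔ ∃ j, ∃ hj : j < m.length, m[j].1 ≤ v ∧ v ≤ m[j].2 := by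
  constructor
  · intro h
    rw [cov, List.any_eq_true] at h
    obtain ⟨p, hp, hcf⟩ := h
    obtain ⟨j, hj, hpj⟩ := List.mem_iff_getElem.mp hp
    refine ⟨j, hj, ?_⟩
    simp only [covf, Bool.and_eq_true, decide_eq_true_iff] at hcf
    rw [← hpj] at hcf
    exact hcf
  · rintro ⟨j, hj, h1, h2⟩
    rw [cov, List.any_eq_true]
    exact ⟨m[j], List.getElem_mem hj, by simp [covf]; exact ⟨h1, h2⟩⟩

-- on a nonempty, disjoint, start-sorted list the bisect test decides coverage
lemma bisect_check (m : List (Int × Int)) (v : Int) (hok : MOk m) :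
    (decide (PySem.List.bisectRight (m.map Prod.fst) v = 0
       ∨ (m.map Prod.snd).getD (PySem.List.bisectRight (m.map Prod.fst) v - 1) 0 < v))
      = !cov m v := by
  obtain ⟨hne, hdisj⟩ := hok
  have hstarts : (m.map Prod.fst).Pairwise (fun a b => a ≤ b) := by
    rw [List.pairwise_map]
    exact hdisj.imp_of_mem (fun {a b} ha hb h => le_trans (hne a ha) (le_of_lt h))
  obtain ⟨hlen, hlt, hge⟩ := PySem.List.bisectRight_spec (m.map Prod.fst) v hstarts
  set i := PySem.List.bisectRight (m.map Prod.fst) v with hi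
  rw [List.length_map] at hlen
  cases hc : cov m v with
  | true =>
    obtain ⟨j, hj, hj1, hj2⟩ := (cov_iff_getElem m v).mp hc
    have hjin : j < i := by
      by_contra hcon
      have := hge j (by simpa) (by omega)
      rw [List.getElem_map] at this; omega
    have hi1 : i - 1 < m.length := by omega
    have hs : m[i-1].1 ≤ v := by
      have := hlt (i-1) (by simpa) (by omega)
      rwa [List.getElem_map] at this
    have hje : j = i - 1 := by
      by_contra hcon
      have := List.pairwise_iff_getElem.mp hdisj j (i-1) hj hi1 (by omega)
      omega
    subst hje
    have hend : (m.map Prod.snd).getD (i-1) 0 = m[i-1].2 := by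
      rw [List.getD_eq_getElem _ _ (by simpa), List.getElem_map]
    simp only [hend, Bool.not_true, decide_eq_false_iff_not, not_or]
    exact ⟨by omega, by omega⟩
  | false =>
    simp only [Bool.not_false, decide_eq_true_iff]
    by_cases hi0 : i = 0
    · exact Or.inl hi0
    · right
      have hi1 : i - 1 < m.length := by omega
      have hs : m[i-1].1 ≤ v := by
        have := hlt (i-1) (by simpa) (by omega)
        rwa [List.getElem_map] at this
      have hend : (m.map Prod.snd).getD (i-1) 0 = m[i-1].2 := by
        rw [List.getD_eq_getElem _ _ (by simpa), List.getElem_map]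
      rw [hend]
      by_contra hcon
      have : cov m v = true := (cov_iff_getElem m v).mpr ⟨i-1, hi1, hs, by omega⟩
      rw [hc] at this
      exact Bool.false_ne_true this

-- ===== VERDICT (by name: the statement is the Claim_ definition above) =====
theorem find_completely_invalid_spec : Claim_equal_find_completely_invalid := by
  intro fields others _
  unfold Spec_find_completely_invalid
  have hbase : build_intervals fields = (fields.map Prod.snd).flatten := by
    rw [build_intervals, PySem.List.foldl_append_eq_flatten]
    simp
  have hsorted := PySem.List.sorted_pairwise
    (((fields.map Prod.snd).flatten).filter (fun p => decide (p.1 ≤ p.2))) (fun p => p.1)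
  have hnonempty : ∀ p ∈ PySem.List.sorted
      (((fields.map Prod.snd).flatten).filter (fun p => decide (p.1 ≤ p.2))) (fun p => p.1),
      p.1 ≤ p.2 := by
    intro p hp
    rw [PySem.List.mem_sorted] at hp
    simpa using (List.mem_filter.mp hp).2
  have hok : MOk (fciFlush ((PySem.List.sorted
      (((fields.map Prod.snd).flatten).filter (fun p => decide (p.1 ≤ p.2))) (fun p => p.1)).foldl
      fciMergeStep ([], none))) :=
    merge_ok _ [] none hsorted hnonempty (by simp) ⟨by simp, by simp⟩ (by simp) (by simp)
  have hcovM : ∀ v, cov (fciFlush ((PySem.List.sorted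
      (((fields.map Prod.snd).flatten).filter (fun p => decide (p.1 ≤ p.2))) (fun p => p.1)).foldl
      fciMergeStep ([], none))) v = cov ((fields.map Prod.snd).flatten) v := by
    intro v
    rw [merge_cov v _ [] none hsorted (by simp)]
    simp only [fciFlush, cov, List.any_nil, Bool.false_or]
    rw [(PySem.List.sorted_perm _ _ _).any_eq]
    exact cov_filter _ v
  have hpred : ∀ v, within_any_interval (build_intervals fields) v
      = !(decide (PySem.List.bisectRight ((fciFlush ((PySem.List.sorted
          (((fields.map Prod.snd).flatten).filter (fun p => decide (p.1 ≤ p.2))) (fun p => p.1)).foldl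
          fciMergeStep ([], none))).map Prod.fst) v = 0
        ∨ ((fciFlush ((PySem.List.sorted
          (((fields.map Prod.snd).flatten).filter (fun p => decide (p.1 ≤ p.2))) (fun p => p.1)).foldl
          fciMergeStep ([], none))).map Prod.snd).getD
          (PySem.List.bisectRight ((fciFlush ((PySem.List.sorted
          (((fields.map Prod.snd).flatten).filter (fun p => decide (p.1 ≤ p.2))) (fun p => p.1)).foldl
          fciMergeStep ([], none))).map Prod.fst) v - 1) 0 < v)) := by
    intro v
    rw [bisect_check _ v hok, Bool.not_not, hbase, within_eq_cov, hcovM v]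
  have hfun : (fun (invalid : List Int) (v : Int) =>
        if !within_any_interval (build_intervals fields) v then invalid ++ [v] else invalid)
      = (fun (invalid : List Int) (v : Int) =>
        if PySem.List.bisectRight ((fciFlush ((PySem.List.sorted
          (((fields.map Prod.snd).flatten).filter (fun p => decide (p.1 ≤ p.2))) (fun p => p.1)).foldl
          fciMergeStep ([], none))).map Prod.fst) v = 0
        ∨ ((fciFlush ((PySem.List.sorted
          (((fields.map Prod.snd).flatten).filter (fun p => decide (p.1 ≤ p.2))) (fun p => p.1)).foldl
          fciMergeStep ([], none))).map Prod.snd).getD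
          (PySem.List.bisectRight ((fciFlush ((PySem.List.sorted
          (((fields.map Prod.snd).flatten).filter (fun p => decide (p.1 ≤ p.2))) (fun p => p.1)).foldl
          fciMergeStep ([], none))).map Prod.fst) v - 1) 0 < v
        then invalid ++ [v] else invalid) := by
    funext invalid v
    rw [hpred v]
    by_cases hP : PySem.List.bisectRight ((fciFlush ((PySem.List.sorted
          (((fields.map Prod.snd).flatten).filter (fun p => decide (p.1 ≤ p.2))) (fun p => p.1)).foldl
          fciMergeStep ([], none))).map Prod.fst) v = 0
        ∨ ((fciFlush ((PySem.List.sorted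
          (((fields.map Prod.snd).flatten).filter (fun p => decide (p.1 ≤ p.2))) (fun p => p.1)).foldl
          fciMergeStep ([], none))).map Prod.snd).getD
          (PySem.List.bisectRight ((fciFlush ((PySem.List.sorted
          (((fields.map Prod.snd).flatten).filter (fun p => decide (p.1 ≤ p.2))) (fun p => p.1)).foldl
          fciMergeStep ([], none))).map Prod.fst) v - 1) 0 < v
    · rw [if_pos (by simpa using hP), if_pos hP]
    · rw [if_neg (by simpa using hP), if_neg hP]
  exact congrArg (fun f : List Int → Int → List Int =>
    others.foldl (fun invalid other => other.foldl f invalid) []) hfun
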